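-- pv_equiv track=rewrite | github.com/MaxDXDX/cbr-currency-service | pretty_table.py | auto_widths
-- ===== SOURCE A (Python) =====
-- def auto_widths(table):
--     """Calculate and return optional columns width due to size of its contents
--
--     :param table: A table which is a list/tuples of list/tuples
--     :return: list of column widths
--     """
--     column_count = len(table[0])
--     row_count = len(table)
--
--     col_widths = []
--
--     for col_index in range(column_count):
--         width = max([len(table[row_index][col_index]) for row_index in range(row_count)])
--         col_widths.append(width)
--     return col_widths
-- ===== SOURCE B (Python) =====
-- def auto_widths(table):
--     """Calculate and return optional columns width due to size of its contents
--
--     :param table: A table which is a list/tuples of list/tuples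
--     :return: list of column widths
--     """
--     col_widths = [0] * len(table[0])
--     for row in table:
--         for col_index in range(len(col_widths)):
--             col_widths[col_index] = max(col_widths[col_index], len(row[col_index]))
--     return col_widths
-- ===== Notes on version B (the rewrite author's own statement) =====
-- stated objective: simpler
-- what changed: Replaces A's column-major pass (building a per-column list of lengths and taking max of it) with a single row-major pass maintaining running maxima per column.
import Mathlib
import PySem

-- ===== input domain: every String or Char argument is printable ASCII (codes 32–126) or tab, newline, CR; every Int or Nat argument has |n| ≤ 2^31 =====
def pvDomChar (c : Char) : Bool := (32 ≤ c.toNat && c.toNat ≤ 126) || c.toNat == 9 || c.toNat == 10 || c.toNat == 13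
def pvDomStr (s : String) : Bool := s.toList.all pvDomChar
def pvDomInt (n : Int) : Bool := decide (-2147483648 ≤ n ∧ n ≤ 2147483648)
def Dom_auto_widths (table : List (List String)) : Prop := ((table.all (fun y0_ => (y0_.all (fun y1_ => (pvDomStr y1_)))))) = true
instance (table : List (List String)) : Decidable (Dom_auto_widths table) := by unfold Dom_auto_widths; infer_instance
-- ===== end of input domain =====

-- B replaces A's column-major list-and-max pass with one row-major pass of running maxima (objective: simpler).

-- ===== PORT A =====
def auto_widths (table : List (List String)) : List Int :=
  let column_count := (table.getD 0 []).length
  let row_count := table.length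
  (List.range column_count).foldl
    (fun col_widths col_index =>
      let width := (PySem.List.max?
        ((List.range row_count).map
          (fun row_index => PySem.Str.len ((table.getD row_index []).getD col_index "")))
        (fun y => y)).getD 0
      col_widths ++ [width]) []

-- ===== PORT B =====
def auto_widths_alt (table : List (List String)) : List Int :=
  let init := List.replicate (table.getD 0 []).length (0 : Int)
  table.foldl
    (fun col_widths row =>
      (List.range col_widths.length).map
        (fun col_index => max (col_widths.getD col_index 0) (PySem.Str.len (row.getD col_index ""))))
    init

-- ===== PRECONDITION & SPEC =====
-- Pre_ excludes exactly the inputs where the Python A raises IndexError: the empty table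
-- (table[0]) and tables with a row shorter than the first row (table[row][col] lookup).
def Pre_auto_widths (table : List (List String)) : Prop :=
  table ≠ [] ∧ ∀ row ∈ table, (table.getD 0 []).length ≤ row.length
instance (table : List (List String)) : Decidable (Pre_auto_widths table) := by
  unfold Pre_auto_widths; infer_instance

def pvWitness_auto_widths : List (List String) := [["a", "bb"], ["ccc", "d"]]

def Spec_auto_widths (table : List (List String)) (out : List Int) : Prop := out = auto_widths_alt table
instance (table : List (List String)) (out : List Int) : Decidable (Spec_auto_widths table out) := by unfold Spec_auto_widths; infer_instance

-- ===== CLAIM (what is proved, stated in full; the proofs are below) =====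
def Claim_equal_auto_widths : Prop := ∀ (table : List (List String)), Dom_auto_widths table → Pre_auto_widths table → Spec_auto_widths table (auto_widths table)

-- ===== LEMMAS AND PROOFS =====

-- indexing a map over range by getD, as a rewriting of `row.getD` through `table.getD`
theorem pv_map_range_getD {α β : Type} (l : List α) (d : α) (g : α → β) :
    (List.range l.length).map (fun i => g (l.getD i d)) = l.map g := by
  induction l with
  | nil => simp
  | cons x t ih =>
    simp only [List.length_cons, List.range_succ_eq_map, List.map_cons, List.map_map]
    simpa using ih

-- B's fold, characterised pointwise: the accumulator stays a map over `range n`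
theorem pv_alt_fold (table : List (List String)) (n : Nat) (g : Nat → Int) :
    table.foldl
      (fun col_widths row =>
        (List.range col_widths.length).map
          (fun col_index => max (col_widths.getD col_index 0) (PySem.Str.len (row.getD col_index ""))))
      ((List.range n).map g)
    = (List.range n).map
        (fun i => table.foldl (fun m row => max m (PySem.Str.len (row.getD i ""))) (g i)) := by
  induction table generalizing g with
  | nil => simp
  | cons r rest ih =>
    simp only [List.foldl_cons]
    rw [show ((List.range n).map g).length = n by simp]
    have hstep :
        (List.range n).map (fun col_index =>
            max (((List.range n).map g).getD col_index 0) (PySem.Str.len (r.getD col_index "")))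
          = (List.range n).map (fun i => max (g i) (PySem.Str.len (r.getD i ""))) := by
      apply List.map_congr_left
      intro i hi
      rw [PySem.List.getD_map_range g n i 0 (List.mem_range.mp hi)]
    rw [hstep, ih]

theorem pv_str_len_nonneg (s : String) : 0 ≤ PySem.Str.len s := by
  rw [PySem.Str.len_eq]; exact Int.natCast_nonneg _

-- ===== VERDICT (by name: the statement is the Claim_ definition above) =====
theorem auto_widths_spec : Claim_equal_auto_widths := by
  intro table _ hpre
  obtain ⟨hne, _⟩ := hpre
  obtain ⟨r0, rest, rfl⟩ := List.exists_cons_of_ne_nil hne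
  unfold Spec_auto_widths auto_widths auto_widths_alt
  simp only [PySem.List.foldl_append_singleton_eq_map, List.nil_append]
  rw [show ((r0 :: rest).getD 0 []) = r0 from rfl]
  have hrepl : List.replicate r0.length (0 : Int) = (List.range r0.length).map (fun _ => (0:Int)) := by
    simp
  rw [hrepl, pv_alt_fold]
  apply List.map_congr_left
  intro ci _
  -- A's per-column max over all rows
  have hlen : (r0 :: rest).length = rest.length + 1 := by simp
  rw [hlen, List.range_succ_eq_map, List.map_cons]
  rw [show (((r0 :: rest) : List (List String)).getD 0 []).getD ci "" = r0.getD ci "" from rfl]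
  have hshift : (List.range rest.length).map
      (fun row_index => PySem.Str.len (((r0 :: rest).getD (row_index + 1) []).getD ci ""))
      = rest.map (fun row => PySem.Str.len (row.getD ci "")) := by
    have := pv_map_range_getD rest ([] : List String) (fun row => PySem.Str.len (row.getD ci ""))
    simpa using this
  rw [List.map_map]
  have hshift' : (List.range rest.length).map
      ((fun row_index => PySem.Str.len (((r0 :: rest).getD row_index []).getD ci "")) ∘ (· + 1))
      = rest.map (fun row => PySem.Str.len (row.getD ci "")) := by
    simpa [Function.comp] using hshift
  rw [hshift', PySem.List.max?_id_cons, Option.getD_some]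
  -- now: foldl max (len r0[ci]) over mapped lengths = B's foldl over rows
  rw [List.foldl_map]
  simp only [List.foldl_cons]
  rw [max_eq_right (pv_str_len_nonneg _)]
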